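-- pv_equiv track=rewrite | github.com/EBSiNoah/flip | flip.py | flip05A03
-- ===== SOURCE A (Python) =====
-- def flip05A03(arr):
--     mat=[[0,0],[0,1],[1,0],[1,1]]
--     restore=[]
--     pattern=[]
--     inpat=[0,1,2,3]
--     value=0
--     various=[0,0,0,0]
--     idx=0
--     size=len(arr)
--     for j in arr:
--         value += j
--
--     for i in range(1,size):
--         idx=0
--         restore.clear()
--         restore.append(arr[i-1])
--         restore.append(arr[i])
--         while(restore != mat[idx]):
--             idx += 1
--         pattern.append(inpat[idx])
--
--     for k in pattern:
--         various[k] += 1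
--
--     return various[1+arr[0]]
-- ===== SOURCE B (Python) =====
-- def flip05A03(arr):
--     # weight table for the one pair type A's final bucket counts: (arr[0], 1-arr[0])
--     w = [[0, 1], [0, 0]] if arr[0] == 0 else [[0, 0], [1, 0]]
--     return sum(w[arr[i - 1]][arr[i]] for i in range(1, len(arr)))
-- ===== Notes on version B (the rewrite author's own statement) =====
-- stated objective: simpler
-- what changed: B drops A's 4x2 lookup table, the per-pair linear table scan, the pattern list and the 4-bucket histogram, and instead counts in one pass the adjacent pairs equal to (arr[0], 1-arr[0]), which is exactly the bucket A finally returns.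
import Mathlib
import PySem

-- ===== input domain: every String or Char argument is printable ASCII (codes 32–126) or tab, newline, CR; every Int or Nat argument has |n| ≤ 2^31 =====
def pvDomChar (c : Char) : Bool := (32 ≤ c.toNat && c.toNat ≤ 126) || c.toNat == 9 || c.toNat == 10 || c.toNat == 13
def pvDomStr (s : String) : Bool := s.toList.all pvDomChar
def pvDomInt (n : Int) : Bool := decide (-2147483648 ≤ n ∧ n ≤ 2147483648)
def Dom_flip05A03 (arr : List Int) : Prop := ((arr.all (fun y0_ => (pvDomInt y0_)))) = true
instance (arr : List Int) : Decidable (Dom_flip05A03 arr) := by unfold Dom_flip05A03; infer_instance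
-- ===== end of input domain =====

-- B replaces A's lookup-table + pattern-list + 4-bucket-histogram pipeline by one direct
-- count of the adjacent pairs equal to (arr[0], 1-arr[0]); objective: simpler.

-- ===== PORT A =====
def flip05A03 (arr : List Int) : Int :=
  let mat : List (List Int) := [[0,0],[0,1],[1,0],[1,1]]
  let inpat : List Int := [0, 1, 2, 3]
  let _value : Int := arr.foldl (fun v j => v + j) 0
  let size : Int := arr.length
  let pattern : List Int :=
    (PySem.List.pyRange 1 size 1).foldl (fun pat i =>
      let restore : List Int := [PySem.List.pyGetD arr (i - 1) 0, PySem.List.pyGetD arr i 0]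
      -- the 'while restore != mat[idx]: idx += 1' scan is exactly mat.index(restore)
      let idx : Nat := (PySem.List.index? mat restore).getD 0
      pat ++ [PySem.List.pyGetD inpat (idx : Int) 0]) []
  let various : List Int :=
    pattern.foldl (fun v k => PySem.List.pySetD v k (PySem.List.pyGetD v k 0 + 1)) [0, 0, 0, 0]
  PySem.List.pyGetD various (1 + PySem.List.pyGetD arr 0 0) 0

-- ===== PORT B =====
def flip05A03_alt (arr : List Int) : Int :=
  let w : List (List Int) :=
    if PySem.List.pyGetD arr 0 0 = 0 then [[0,1],[0,0]] else [[0,0],[1,0]]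
  ((PySem.List.pyRange 1 (arr.length : Int) 1).map (fun i =>
    PySem.List.pyGetD (PySem.List.pyGetD w (PySem.List.pyGetD arr (i - 1) 0) [])
      (PySem.List.pyGetD arr i 0) 0)).sum

-- ===== PRECONDITION & SPEC =====
-- Pre_ admits exactly the inputs on which Python A returns: nonempty 0/1 lists, plus the
-- single-element lists whose sole value lies in [-5,2] (there A's final index stays in
-- range of the 4-bucket list and A returns 0).
def Pre_flip05A03 (arr : List Int) : Prop :=
  arr ≠ [] ∧
    ((∀ x ∈ arr, x = 0 ∨ x = 1) ∨ (arr.length = 1 ∧ -5 ≤ arr.headI ∧ arr.headI ≤ 2))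
instance (arr : List Int) : Decidable (Pre_flip05A03 arr) := by unfold Pre_flip05A03; infer_instance
def pvWitness_flip05A03 : List Int := [0, 1, 1, 0, 1]

def Spec_flip05A03 (arr : List Int) (out : Int) : Prop := out = flip05A03_alt arr
instance (arr : List Int) (out : Int) : Decidable (Spec_flip05A03 arr out) := by unfold Spec_flip05A03; infer_instance

-- ===== CLAIM (what is proved, stated in full; the proofs are below) =====
def Claim_equal_flip05A03 : Prop := ∀ (arr : List Int), Dom_flip05A03 arr → Pre_flip05A03 arr → Spec_flip05A03 arr (flip05A03 arr)

-- ===== LEMMAS AND PROOFS =====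

-- pair-index lemma: the table scan + inpat lookup computes 2*a + b on binary pairs
lemma pairIdx (a b : Int) (ha : a = 0 ∨ a = 1) (hb : b = 0 ∨ b = 1) :
    PySem.List.pyGetD [0,1,2,3]
      (((PySem.List.index? [[0,0],[0,1],[1,0],[1,1]] [a,b]).getD 0 : Nat) : Int) 0 = 2*a + b := by
  rcases ha with rfl | rfl <;> rcases hb with rfl | rfl <;> decide


lemma hist4 (p : List Int) (hp : ∀ k ∈ p, k = 0 ∨ k = 1 ∨ k = 2 ∨ k = 3) (v0 v1 v2 v3 : Int) :
    p.foldl (fun v k => PySem.List.pySetD v k (PySem.List.pyGetD v k 0 + 1)) [v0,v1,v2,v3]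
      = [v0 + p.count 0, v1 + p.count 1, v2 + p.count 2, v3 + p.count 3] := by
  induction p generalizing v0 v1 v2 v3 with
  | nil => simp
  | cons k p ih =>
    have hp' : ∀ x ∈ p, x = 0 ∨ x = 1 ∨ x = 2 ∨ x = 3 := fun x hx => hp x (List.mem_cons_of_mem _ hx)
    rcases hp k List.mem_cons_self with rfl | rfl | rfl | rfl
    · simp only [List.foldl_cons]
      have hstep : PySem.List.pySetD [v0,v1,v2,v3] (0:Int) (PySem.List.pyGetD [v0,v1,v2,v3] (0:Int) 0 + 1) = [v0+1,v1,v2,v3] := by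
        simp [PySem.List.pySetD, PySem.List.pySet?, PySem.List.pyGetD, PySem.List.pyGet?, PySem.List.pyIdx?]
      rw [hstep, ih hp']
      simp
      omega
    · simp only [List.foldl_cons]
      have hstep : PySem.List.pySetD [v0,v1,v2,v3] (1:Int) (PySem.List.pyGetD [v0,v1,v2,v3] (1:Int) 0 + 1) = [v0,v1+1,v2,v3] := by
        simp [PySem.List.pySetD, PySem.List.pySet?, PySem.List.pyGetD, PySem.List.pyGet?, PySem.List.pyIdx?]
      rw [hstep, ih hp']
      simp
      omega
    · simp only [List.foldl_cons]
      have hstep : PySem.List.pySetD [v0,v1,v2,v3] (2:Int) (PySem.List.pyGetD [v0,v1,v2,v3] (2:Int) 0 + 1) = [v0,v1,v2+1,v3] := by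
        simp [PySem.List.pySetD, PySem.List.pySet?, PySem.List.pyGetD, PySem.List.pyGet?, PySem.List.pyIdx?]
      rw [hstep, ih hp']
      simp
      omega
    · simp only [List.foldl_cons]
      have hstep : PySem.List.pySetD [v0,v1,v2,v3] (3:Int) (PySem.List.pyGetD [v0,v1,v2,v3] (3:Int) 0 + 1) = [v0,v1,v2,v3+1] := by
        simp [PySem.List.pySetD, PySem.List.pySet?, PySem.List.pyGetD, PySem.List.pyGet?, PySem.List.pyIdx?]
      rw [hstep, ih hp']
      simp
      omega



lemma count_map_eq_sum (l : List Int) (g u : Int → Int) (c : Int)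
    (h : ∀ i ∈ l, u i = if g i = c then (1:Int) else 0) :
    ((l.map g).count c : Int) = (l.map u).sum := by
  induction l with
  | nil => simp
  | cons i l ih =>
    have ih' := ih (fun j hj => h j (List.mem_cons_of_mem _ hj))
    by_cases hc : g i = c
    · simp [hc, h i List.mem_cons_self, ← ih']
      omega
    · simp [hc, h i List.mem_cons_self, ← ih']

lemma getD4_1 (l0 l1 l2 l3 : Int) : PySem.List.pyGetD [l0,l1,l2,l3] (1:Int) 0 = l1 := by
  simp [PySem.List.pyGetD, PySem.List.pyGet?, PySem.List.pyIdx?]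

lemma getD4_2 (l0 l1 l2 l3 : Int) : PySem.List.pyGetD [l0,l1,l2,l3] (2:Int) 0 = l2 := by
  simp [PySem.List.pyGetD, PySem.List.pyGet?, PySem.List.pyIdx?]

lemma flip05A03_eq_alt_of_binary : ∀ (arr : List Int), arr ≠ [] → (∀ x ∈ arr, x = 0 ∨ x = 1) →
    flip05A03 arr = flip05A03_alt arr := by
  intro arr hne hbin
  have hlen : 1 ≤ arr.length := List.length_pos_iff.mpr hne
  -- the first element, a binary value
  have h0mem : PySem.List.pyGetD arr 0 0 ∈ arr :=
    PySem.List.pyGetD_mem arr 0 (by constructor <;> omega)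
  unfold flip05A03 flip05A03_alt
  simp only []
  rw [PySem.List.foldl_append_singleton_eq_map
      (f := fun i => PySem.List.pyGetD [0,1,2,3]
        (((PySem.List.index? [[0,0],[0,1],[1,0],[1,1]]
            [PySem.List.pyGetD arr (i-1) 0, PySem.List.pyGetD arr i 0]).getD 0 : Nat) : Int) 0)]
  rw [List.nil_append]
  -- membership-based binary facts along the range
  have hab : ∀ i ∈ PySem.List.pyRange 1 (arr.length : Int) 1,
      (PySem.List.pyGetD arr (i-1) 0 = 0 ∨ PySem.List.pyGetD arr (i-1) 0 = 1) ∧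
      (PySem.List.pyGetD arr i 0 = 0 ∨ PySem.List.pyGetD arr i 0 = 1) := by
    intro i hi
    rw [PySem.List.mem_pyRange_one] at hi
    exact ⟨hbin _ (PySem.List.pyGetD_mem arr 0 (by constructor <;> omega)),
           hbin _ (PySem.List.pyGetD_mem arr 0 (by constructor <;> omega))⟩
  -- the table scan computes 2*a + b
  rw [List.map_congr_left (fun i hi => pairIdx _ _ (hab i hi).1 (hab i hi).2)]
  rw [hist4 _ (by
    intro k hk
    obtain ⟨i, hi, rfl⟩ := List.mem_map.mp hk
    rcases (hab i hi).1 with ha | ha <;> rcases (hab i hi).2 with hb | hb <;>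
      rw [ha, hb] <;> norm_num)]
  -- extract the bucket and compare with B's direct count
  rcases hbin _ h0mem with h0 | h0
  · rw [h0]
    norm_num [getD4_1]
    exact count_map_eq_sum _ _ _ _ (fun i hi => by
      rcases (hab i hi).1 with ha | ha <;> rcases (hab i hi).2 with hb | hb <;>
        rw [ha, hb] <;> decide)
  · rw [h0]
    norm_num [getD4_2]
    exact count_map_eq_sum _ _ _ _ (fun i hi => by
      rcases (hab i hi).1 with ha | ha <;> rcases (hab i hi).2 with hb | hb <;>
        rw [ha, hb] <;> decide)

-- ===== VERDICT (by name: the statement is the Claim_ definition above) =====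
theorem flip05A03_spec : Claim_equal_flip05A03 := by
  intro arr _ hpre
  obtain ⟨hne, hcase⟩ := hpre
  unfold Spec_flip05A03
  rcases hcase with hbin | ⟨hlen1, hlo, hhi⟩
  · exact flip05A03_eq_alt_of_binary arr hne hbin
  · obtain ⟨x, rfl⟩ : ∃ x, arr = [x] := by
      cases arr with
      | nil => simp at hlen1
      | cons a t =>
        cases t with
        | nil => exact ⟨a, rfl⟩
        | cons b t => simp at hlen1
    simp only [List.headI] at hlo hhi
    interval_cases x <;> decide
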